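-- pv_equiv track=rewrite | github.com/andrewschultz/stale-tales-slate | utils/pach.py | match_up
-- ===== SOURCE A (Python) =====
-- consonants = 'bcdfghjklmnpqrstvwxz'
--
-- vowels = 'aeiou'
--
-- ys = 'y'
--
-- def match_up(scanned, scan_results, candidate, ambiguous_forced_matches = []):
--     for x in range(0, len(scanned)):
--         if scan_results[x] == 'r':
--             if candidate[x] not in consonants:
--                 return False
--             if scanned[x] == candidate[x]:
--                 return False
--         elif scan_results[x] == 'p':
--             if candidate[x] not in consonants:
--                 return False
--             if scanned[x] != candidate[x]:
--                 return False
--         elif scan_results[x] == 'y':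
--             if candidate[x] not in vowels:
--                 return False
--             if scanned[x] == candidate[x]:
--                 return False
--         elif scan_results[x] == 'g':
--             if candidate[x] not in vowels:
--                 return False
--             if scanned[x] != candidate[x]:
--                 return False
--         elif scan_results[x] == 'o':
--             if candidate[x] not in ys:
--                 return False
--             if scanned[x] == candidate[x]:
--                 return False
--         elif scan_results[x] == 'b':
--             if candidate[x] not in ys:
--                 return False
--             if scanned[x] != candidate[x]:
--                 return False
--         else:
--             return False
--     return True
-- ===== SOURCE B (Python) =====
-- consonants = 'bcdfghjklmnpqrstvwxz'
--
-- vowels = 'aeiou'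
--
-- ys = 'y'
--
-- def _code(s, c):
--     # the unique scan-result code that the pair (scanned char, candidate char)
--     # satisfies; '' if the candidate char belongs to no letter class
--     if c in consonants:
--         return 'p' if s == c else 'r'
--     if c in vowels:
--         return 'g' if s == c else 'y'
--     if c in ys:
--         return 'b' if s == c else 'o'
--     return ''
--
-- def match_up(scanned, scan_results, candidate, ambiguous_forced_matches = []):
--     # invert the relation: recompute the scan string of (scanned, candidate)
--     # and compare it with scan_results over scanned's length
--     expected = ''.join(_code(s, c) for s, c in zip(scanned, candidate))
--     return len(expected) == len(scanned) and expected == scan_results[:len(scanned)]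
-- ===== Notes on version B (the rewrite author's own statement) =====
-- stated objective: simpler
-- what changed: Inverts the computation: instead of validating the candidate against the per-code constraint of each scan-result character, B recomputes the scan-code string that the (scanned, candidate) character pairs would produce and compares it as a whole with scan_results over scanned's length.
-- outside the precondition, e.g. on match_up('ab', 'rz', 'c', []): A returns False, B returns False
import Mathlib
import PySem

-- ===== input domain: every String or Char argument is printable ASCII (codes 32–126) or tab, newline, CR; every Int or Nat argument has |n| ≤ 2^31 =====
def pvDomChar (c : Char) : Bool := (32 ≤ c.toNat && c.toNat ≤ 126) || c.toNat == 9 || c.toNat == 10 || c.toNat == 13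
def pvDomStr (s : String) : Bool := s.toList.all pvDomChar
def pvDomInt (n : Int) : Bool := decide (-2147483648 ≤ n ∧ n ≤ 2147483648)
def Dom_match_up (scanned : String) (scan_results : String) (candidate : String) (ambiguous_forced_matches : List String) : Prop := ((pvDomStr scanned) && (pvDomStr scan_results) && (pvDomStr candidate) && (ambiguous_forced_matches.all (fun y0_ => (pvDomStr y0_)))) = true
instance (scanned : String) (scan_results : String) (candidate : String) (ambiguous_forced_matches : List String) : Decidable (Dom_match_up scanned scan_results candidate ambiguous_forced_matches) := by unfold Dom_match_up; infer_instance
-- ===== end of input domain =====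

-- B inverts the computation: it recomputes the scan-code string that the
-- (scanned, candidate) pairs would produce and compares it with scan_results
-- over scanned's length (objective: simpler).

-- ===== PORT A =====
-- module constants
def consonantsL : List Char := "bcdfghjklmnpqrstvwxz".toList
def vowelsL : List Char := "aeiou".toList
def ysL : List Char := "y".toList

-- the body of one iteration of A's loop: sc = scanned[x], rc = scan_results[x],
-- co = candidate[x] fetched where A fetches it (none = IndexError, outside Pre_),
-- rest = the rest of the loop; branches in A's order
def muBodyA (sc rc : Char) (co : Option Char) (rest : Bool) : Bool :=
  if rc == 'r' then
    match co with
    | none => false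
    | some cc =>
      if ¬ consonantsL.contains cc then false
      else if sc == cc then false else rest
  else if rc == 'p' then
    match co with
    | none => false
    | some cc =>
      if ¬ consonantsL.contains cc then false
      else if sc != cc then false else rest
  else if rc == 'y' then
    match co with
    | none => false
    | some cc =>
      if ¬ vowelsL.contains cc then false
      else if sc == cc then false else rest
  else if rc == 'g' then
    match co with
    | none => false
    | some cc =>
      if ¬ vowelsL.contains cc then false
      else if sc != cc then false else rest
  else if rc == 'o' then
    match co with
    | none => false
    | some cc =>
      if ¬ ysL.contains cc then false
      else if sc == cc then false else rest
  else if rc == 'b' then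
    match co with
    | none => false
    | some cc =>
      if ¬ ysL.contains cc then false
      else if sc != cc then false else rest
  else false

-- for x in range(0, len(scanned)): … ; scan_results[x] out of range = IndexError,
-- modelled as false (outside Pre_)
def muLoopA (s r cd : List Char) (x : Nat) : Bool :=
  if h : x < s.length then
    match r[x]? with
    | none => false
    | some rc => muBodyA (s[x]'h) rc cd[x]? (muLoopA s r cd (x + 1))
  else true
termination_by s.length - x

def match_up (scanned : String) (scan_results : String) (candidate : String) (ambiguous_forced_matches : List String) : Bool :=
  muLoopA scanned.toList scan_results.toList candidate.toList 0

-- ===== PORT B =====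
-- _code(s, c): the scan-result code the pair satisfies, as a 0/1-char string
def codeL (s c : Char) : List Char :=
  if consonantsL.contains c then (if s == c then ['p'] else ['r'])
  else if vowelsL.contains c then (if s == c then ['g'] else ['y'])
  else if ysL.contains c then (if s == c then ['b'] else ['o'])
  else []

-- ''.join over zip = flatten of the mapped codes; scan_results[:len(scanned)]
-- with a nonnegative stop is List.take
def match_up_alt (scanned : String) (scan_results : String) (candidate : String) (ambiguous_forced_matches : List String) : Bool :=
  let expected := ((scanned.toList.zip candidate.toList).map (fun p => codeL p.1 p.2)).flatten
  (expected.length == scanned.toList.length) && (expected == scan_results.toList.take scanned.toList.length)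

-- ===== PRECONDITION & SPEC =====
-- position j satisfies the constraint its scan-result code imposes
def pvPosOk (sc rc cc : Char) : Bool :=
  (rc == 'r' && consonantsL.contains cc && sc != cc) ||
  (rc == 'p' && consonantsL.contains cc && sc == cc) ||
  (rc == 'y' && vowelsL.contains cc && sc != cc) ||
  (rc == 'g' && vowelsL.contains cc && sc == cc) ||
  (rc == 'o' && ysL.contains cc && sc != cc) ||
  (rc == 'b' && ysL.contains cc && sc == cc)

-- Pre_ admits inputs where scan_results and candidate cover all of scanned, and
-- also short ones with a violated position inside the common range (there A
-- returns False before reaching a missing index).  It excludes inputs on which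
-- A's loop reaches a missing position and raises IndexError, and a thin margin
-- of short inputs where A returns False at a position past the common range.
def Pre_match_up (scanned : String) (scan_results : String) (candidate : String) (ambiguous_forced_matches : List String) : Prop :=
  (scanned.toList.length ≤ scan_results.toList.length ∧ scanned.toList.length ≤ candidate.toList.length) ∨
  (∃ j, j < scanned.toList.length ∧ j < scan_results.toList.length ∧ j < candidate.toList.length ∧
    pvPosOk (scanned.toList.getD j ' ') (scan_results.toList.getD j ' ') (candidate.toList.getD j ' ') = false)
instance (scanned : String) (scan_results : String) (candidate : String) (ambiguous_forced_matches : List String) : Decidable (Pre_match_up scanned scan_results candidate ambiguous_forced_matches) := by unfold Pre_match_up; infer_instance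

def pvWitness_match_up : String × String × String × List String := ("ab", "rp", "cb", [])

def Spec_match_up (scanned : String) (scan_results : String) (candidate : String) (ambiguous_forced_matches : List String) (out : Bool) : Prop := out = match_up_alt scanned scan_results candidate ambiguous_forced_matches
instance (scanned : String) (scan_results : String) (candidate : String) (ambiguous_forced_matches : List String) (out : Bool) : Decidable (Spec_match_up scanned scan_results candidate ambiguous_forced_matches out) := by unfold Spec_match_up; infer_instance

-- ===== CLAIM (what is proved, stated in full; the proofs are below) =====
def Claim_equal_match_up : Prop := ∀ (scanned : String) (scan_results : String) (candidate : String) (ambiguous_forced_matches : List String), Dom_match_up scanned scan_results candidate ambiguous_forced_matches → Pre_match_up scanned scan_results candidate ambiguous_forced_matches → Spec_match_up scanned scan_results candidate ambiguous_forced_matches (match_up scanned scan_results candidate ambiguous_forced_matches)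

-- ===== LEMMAS AND PROOFS =====

-- per-position pass predicate: the pair's code is exactly the scan-result char
def passB (t : (Char × Char) × Char) : Bool := codeL t.1.1 t.2 == [t.1.2]

-- the expected scan string B builds
def expectedL (s cd : List Char) : List Char :=
  ((s.zip cd).map (fun p => codeL p.1 p.2)).flatten

-- recursive three-way scan equivalent to B's comparison (proof helper only)
def allB : List Char → List Char → List Char → Bool
  | [], _, _ => true
  | _ :: _, [], _ => false
  | _ :: _, _ :: _, [] => false
  | a :: s', b :: r', c :: cd' => (codeL a c == [b]) && allB s' r' cd'

lemma codeL_cases (s c : Char) : codeL s c = [] ∨ ∃ d, codeL s c = [d] := by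
  unfold codeL; split_ifs <;> simp

lemma expectedL_len_le (s cd : List Char) : (expectedL s cd).length ≤ s.length := by
  induction s generalizing cd with
  | nil => simp [expectedL]
  | cons a s' ih =>
    cases cd with
    | nil => simp [expectedL]
    | cons c cd' =>
      simp only [expectedL, List.zip_cons_cons, List.map_cons, List.flatten_cons,
        List.length_append, List.length_cons]
      have h1 : (codeL a c).length ≤ 1 := by
        rcases codeL_cases a c with h | ⟨d, h⟩ <;> simp [h]
      have h2 := ih cd'
      simp only [expectedL] at h2
      omega

-- class disjointness
lemma con_not_vow (c : Char) (h : consonantsL.contains c = true) : vowelsL.contains c = false := by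
  cases hv : vowelsL.contains c
  · rfl
  · exfalso
    have h1 : c ∈ consonantsL := by simpa using h
    have h2 : c ∈ vowelsL := by simpa using hv
    have hm : c ∈ consonantsL ∩ vowelsL := List.mem_inter_iff.mpr ⟨h1, h2⟩
    rw [show consonantsL ∩ vowelsL = [] from by decide] at hm
    simp at hm

lemma con_not_ys (c : Char) (h : consonantsL.contains c = true) : ysL.contains c = false := by
  cases hv : ysL.contains c
  · rfl
  · exfalso
    have h1 : c ∈ consonantsL := by simpa using h
    have h2 : c ∈ ysL := by simpa using hv
    have hm : c ∈ consonantsL ∩ ysL := List.mem_inter_iff.mpr ⟨h1, h2⟩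
    rw [show consonantsL ∩ ysL = [] from by decide] at hm
    simp at hm

lemma vow_not_ys (c : Char) (h : vowelsL.contains c = true) : ysL.contains c = false := by
  cases hv : ysL.contains c
  · rfl
  · exfalso
    have h1 : c ∈ vowelsL := by simpa using h
    have h2 : c ∈ ysL := by simpa using hv
    have hm : c ∈ vowelsL ∩ ysL := List.mem_inter_iff.mpr ⟨h1, h2⟩
    rw [show vowelsL ∩ ysL = [] from by decide] at hm
    simp at hm

-- the code tests characterized per scan-result code
lemma codeL_beq_r (sc cc : Char) :
    (codeL sc cc == ['r']) = (consonantsL.contains cc && sc != cc) := by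
  cases hcon : consonantsL.contains cc
  · simp only [codeL, hcon, Bool.false_eq_true, if_false, Bool.false_and]
    split_ifs <;> simp
  · simp only [codeL, hcon, if_true, Bool.true_and]
    cases hsc : sc == cc <;> simp [hsc, bne]

lemma codeL_beq_p (sc cc : Char) :
    (codeL sc cc == ['p']) = (consonantsL.contains cc && sc == cc) := by
  cases hcon : consonantsL.contains cc
  · simp only [codeL, hcon, Bool.false_eq_true, if_false, Bool.false_and]
    split_ifs <;> simp
  · simp only [codeL, hcon, if_true, Bool.true_and]
    cases hsc : sc == cc <;> simp [hsc]

lemma codeL_beq_y (sc cc : Char) :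
    (codeL sc cc == ['y']) = (vowelsL.contains cc && sc != cc) := by
  cases hcon : consonantsL.contains cc
  · cases hvow : vowelsL.contains cc
    · simp only [codeL, hcon, hvow, Bool.false_eq_true, if_false, Bool.false_and]
      split_ifs <;> simp
    · simp only [codeL, hcon, hvow, Bool.false_eq_true, if_false, if_true, Bool.true_and]
      cases hsc : sc == cc <;> simp [hsc, bne]
  · rw [con_not_vow _ hcon]
    simp only [codeL, hcon, if_true, Bool.false_and]
    cases hsc : sc == cc <;> simp [hsc]

lemma codeL_beq_g (sc cc : Char) :
    (codeL sc cc == ['g']) = (vowelsL.contains cc && sc == cc) := by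
  cases hcon : consonantsL.contains cc
  · cases hvow : vowelsL.contains cc
    · simp only [codeL, hcon, hvow, Bool.false_eq_true, if_false, Bool.false_and]
      split_ifs <;> simp
    · simp only [codeL, hcon, hvow, Bool.false_eq_true, if_false, if_true, Bool.true_and]
      cases hsc : sc == cc <;> simp [hsc]
  · rw [con_not_vow _ hcon]
    simp only [codeL, hcon, if_true, Bool.false_and]
    cases hsc : sc == cc <;> simp [hsc]

lemma codeL_beq_o (sc cc : Char) :
    (codeL sc cc == ['o']) = (ysL.contains cc && sc != cc) := by
  cases hcon : consonantsL.contains cc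
  · cases hvow : vowelsL.contains cc
    · cases hys : ysL.contains cc
      · simp only [codeL, hcon, hvow, hys, Bool.false_eq_true, if_false, Bool.false_and]
        simp
      · simp only [codeL, hcon, hvow, hys, Bool.false_eq_true, if_false, if_true, Bool.true_and]
        cases hsc : sc == cc <;> simp [hsc, bne]
    · rw [vow_not_ys _ hvow]
      simp only [codeL, hcon, hvow, Bool.false_eq_true, if_false, if_true, Bool.false_and]
      cases hsc : sc == cc <;> simp [hsc]
  · rw [con_not_ys _ hcon]
    simp only [codeL, hcon, if_true, Bool.false_and]
    cases hsc : sc == cc <;> simp [hsc]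

lemma codeL_beq_b (sc cc : Char) :
    (codeL sc cc == ['b']) = (ysL.contains cc && sc == cc) := by
  cases hcon : consonantsL.contains cc
  · cases hvow : vowelsL.contains cc
    · cases hys : ysL.contains cc
      · simp only [codeL, hcon, hvow, hys, Bool.false_eq_true, if_false, Bool.false_and]
        simp
      · simp only [codeL, hcon, hvow, hys, Bool.false_eq_true, if_false, if_true, Bool.true_and]
        cases hsc : sc == cc <;> simp [hsc]
    · rw [vow_not_ys _ hvow]
      simp only [codeL, hcon, hvow, Bool.false_eq_true, if_false, if_true, Bool.false_and]
      cases hsc : sc == cc <;> simp [hsc]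
  · rw [con_not_ys _ hcon]
    simp only [codeL, hcon, if_true, Bool.false_and]
    cases hsc : sc == cc <;> simp [hsc]

-- an unknown scan-result code matches no pair's code
lemma codeL_beq_other (sc rc cc : Char) (h1 : rc ≠ 'r') (h2 : rc ≠ 'p')
    (h3 : rc ≠ 'y') (h4 : rc ≠ 'g') (h5 : rc ≠ 'o') (h6 : rc ≠ 'b') :
    (codeL sc cc == [rc]) = false := by
  unfold codeL
  split_ifs <;> simp [Ne.symm h1, Ne.symm h2, Ne.symm h3, Ne.symm h4, Ne.symm h5, Ne.symm h6]

-- A's loop body equals B's per-position predicate times the rest of the loop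
lemma muBody_eq_pass (sc rc cc : Char) (rest : Bool) :
    muBodyA sc rc (some cc) rest = (passB ((sc, rc), cc) && rest) := by
  simp only [passB]
  by_cases h1 : rc = 'r'
  · subst h1
    simp only [muBodyA, codeL_beq_r]
    cases hcon : consonantsL.contains cc <;> cases hsc : sc == cc <;>
      simp [hcon, hsc, bne]
  · by_cases h2 : rc = 'p'
    · subst h2
      simp only [muBodyA, codeL_beq_p]
      cases hcon : consonantsL.contains cc <;> cases hsc : sc == cc <;>
        simp [hcon, hsc, bne]
    · by_cases h3 : rc = 'y'
      · subst h3
        simp only [muBodyA, codeL_beq_y]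
        cases hvow : vowelsL.contains cc <;> cases hsc : sc == cc <;>
          simp [hvow, hsc, bne]
      · by_cases h4 : rc = 'g'
        · subst h4
          simp only [muBodyA, codeL_beq_g]
          cases hvow : vowelsL.contains cc <;> cases hsc : sc == cc <;>
            simp [hvow, hsc, bne]
        · by_cases h5 : rc = 'o'
          · subst h5
            simp only [muBodyA, codeL_beq_o]
            cases hys : ysL.contains cc <;> cases hsc : sc == cc <;>
              simp [hys, hsc, bne]
          · by_cases h6 : rc = 'b'
            · subst h6
              simp only [muBodyA, codeL_beq_b]
              cases hys : ysL.contains cc <;> cases hsc : sc == cc <;>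
                simp [hys, hsc, bne]
            · rw [codeL_beq_other sc rc cc h1 h2 h3 h4 h5 h6]
              simp [muBodyA, h1, h2, h3, h4, h5, h6]

lemma muLoop_eq_all (s r cd : List Char) (hr : s.length ≤ r.length)
    (hc : s.length ≤ cd.length) :
    ∀ x, muLoopA s r cd x = (((s.zip r).zip cd).drop x).all passB := by
  intro x
  have hlen : ((s.zip r).zip cd).length = s.length := by
    simp [List.length_zip]; omega
  induction hn : s.length - x using Nat.strong_induction_on generalizing x with
  | _ n ih =>
    rw [muLoopA]
    by_cases h : x < s.length
    · have hxr : x < r.length := by omega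
      have hxc : x < cd.length := by omega
      have hxz : x < ((s.zip r).zip cd).length := by omega
      rw [List.drop_eq_getElem_cons hxz]
      have hget : ((s.zip r).zip cd)[x]'hxz = ((s[x]'h, r[x]'hxr), cd[x]'hxc) := by
        simp [List.getElem_zip]
      rw [dif_pos h, List.getElem?_eq_getElem hxr, List.getElem?_eq_getElem hxc]
      rw [ih (s.length - (x + 1)) (by omega) (x + 1) rfl]
      rw [hget, List.all_cons]
      exact muBody_eq_pass (s[x]'h) (r[x]'hxr) (cd[x]'hxc) _
    · rw [dif_neg h]
      have : ((s.zip r).zip cd).drop x = [] := by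
        apply List.drop_eq_nil_of_le; omega
      simp [this]

-- under full coverage, A's positionwise pass equals the three-way scan
lemma all_pass_eq_allB (s : List Char) : ∀ (r cd : List Char), s.length ≤ r.length →
    s.length ≤ cd.length → ((s.zip r).zip cd).all passB = allB s r cd := by
  induction s with
  | nil => intro r cd _ _; simp [allB]
  | cons a s' ih =>
    intro r cd hr hc
    cases r with
    | nil => simp at hr
    | cons b r' =>
      cases cd with
      | nil => simp at hc
      | cons c cd' =>
        simp only [List.zip_cons_cons, List.all_cons, allB]
        rw [ih r' cd' (by simpa using hr) (by simpa using hc)]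
        rfl

-- B's whole comparison equals the three-way scan, for ALL lengths
lemma bexpr_eq_allB (s : List Char) : ∀ (r cd : List Char),
    (((expectedL s cd).length == s.length) &&
      (expectedL s cd == r.take s.length)) = allB s r cd := by
  induction s with
  | nil => intro r cd; simp [expectedL, allB]
  | cons a s' ih =>
    intro r cd
    cases cd with
    | nil =>
      cases r <;> simp [expectedL, allB]
    | cons c cd' =>
      have hE : expectedL (a :: s') (c :: cd') = codeL a c ++ expectedL s' cd' := by
        simp [expectedL]
      cases r with
      | nil =>
        simp only [allB, hE]
        rcases codeL_cases a c with h | ⟨d, h⟩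
        · have := expectedL_len_le s' cd'
          simp [h]
          omega
        · simp [h]
      | cons b r' =>
        simp only [allB, hE, List.length_cons, List.take_succ_cons]
        rcases codeL_cases a c with h | ⟨d, h⟩
        · have := expectedL_len_le s' cd'
          have hne : ((expectedL s' cd').length == s'.length + 1) = false := by
            simp; omega
          simp [h, hne]
        · rw [h, ← ih r' cd']
          simp [Bool.and_left_comm]

-- pvPosOk is the per-position pass predicate
lemma pvPosOk_eq_pass (sc rc cc : Char) :
    pvPosOk sc rc cc = passB ((sc, rc), cc) := by
  simp only [passB, pvPosOk]
  by_cases h1 : rc = 'r'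
  · subst h1; rw [codeL_beq_r]; simp
  · by_cases h2 : rc = 'p'
    · subst h2; rw [codeL_beq_p]; simp [h1]
    · by_cases h3 : rc = 'y'
      · subst h3; rw [codeL_beq_y]; simp [h1, h2]
      · by_cases h4 : rc = 'g'
        · subst h4; rw [codeL_beq_g]; simp [h1, h2, h3]
        · by_cases h5 : rc = 'o'
          · subst h5; rw [codeL_beq_o]; simp [h1, h2, h3, h4]
          · by_cases h6 : rc = 'b'
            · subst h6; rw [codeL_beq_b]; simp [h1, h2, h3, h4, h5]
            · rw [codeL_beq_other sc rc cc h1 h2 h3 h4 h5 h6]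
              simp [h1, h2, h3, h4, h5, h6]

-- a violated position inside the common range forces A's loop to return false
lemma muLoopA_false (s r cd : List Char) (j : Nat) (hjs : j < s.length)
    (hjr : j < r.length) (hjc : j < cd.length)
    (hfail : passB ((s[j], r[j]), cd[j]) = false) :
    ∀ x, x ≤ j → muLoopA s r cd x = false := by
  intro x hx
  induction hn : j - x using Nat.strong_induction_on generalizing x with
  | _ n ih =>
    rw [muLoopA]
    have hxs : x < s.length := by omega
    rw [dif_pos hxs, List.getElem?_eq_getElem (by omega : x < r.length),
        List.getElem?_eq_getElem (by omega : x < cd.length)]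
    have hstep := muBody_eq_pass (s[x]'hxs) (r[x]'(by omega)) (cd[x]'(by omega))
      (muLoopA s r cd (x + 1))
    by_cases hxj : x = j
    · subst hxj
      exact hstep.trans (by rw [hfail]; simp)
    · have hrest : muLoopA s r cd (x + 1) = false :=
        ih (j - (x + 1)) (by omega) (x + 1) (by omega) rfl
      exact hstep.trans (by rw [hrest, Bool.and_false])

-- a violated position inside the common range forces the three-way scan to false
lemma allB_false (s : List Char) : ∀ (r cd : List Char) (j : Nat)
    (hjs : j < s.length) (hjr : j < r.length) (hjc : j < cd.length),
    passB ((s[j], r[j]), cd[j]) = false → allB s r cd = false := by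
  induction s with
  | nil => intro r cd j hj _ _ _; simp at hj
  | cons a s' ih =>
    intro r cd j hjs hjr hjc hfail
    cases r with
    | nil => simp at hjr
    | cons b r' =>
      cases cd with
      | nil => simp at hjc
      | cons c cd' =>
        cases j with
        | zero =>
          simp only [List.getElem_cons_zero] at hfail
          simp only [allB, passB] at hfail ⊢
          rw [hfail]; rfl
        | succ j' =>
          simp only [List.getElem_cons_succ] at hfail
          have := ih r' cd' j' (by simpa using hjs) (by simpa using hjr)
            (by simpa using hjc) hfail
          simp [allB, this]

-- ===== VERDICT (by name: the statement is the Claim_ definition above) =====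
theorem match_up_spec : Claim_equal_match_up := by
  intro scanned scan_results candidate afm _ hpre
  unfold Spec_match_up match_up match_up_alt
  show muLoopA scanned.toList scan_results.toList candidate.toList 0 =
    (((expectedL scanned.toList candidate.toList).length == scanned.toList.length) &&
      (expectedL scanned.toList candidate.toList == scan_results.toList.take scanned.toList.length))
  rw [bexpr_eq_allB]
  rcases hpre with ⟨h1, h2⟩ | ⟨j, hjs, hjr, hjc, hfail⟩
  · rw [muLoop_eq_all _ _ _ h1 h2 0]
    simpa using all_pass_eq_allB _ _ _ h1 h2
  · rw [List.getD_eq_getElem _ _ hjs, List.getD_eq_getElem _ _ hjr,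
        List.getD_eq_getElem _ _ hjc, pvPosOk_eq_pass] at hfail
    rw [muLoopA_false _ _ _ j hjs hjr hjc hfail 0 (Nat.zero_le j),
        allB_false _ _ _ j hjs hjr hjc hfail]
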